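-- pv_equiv track=rewrite | github.com/AndreaLaino/Simulator | graph.py | _match_full_or_suffix
-- ===== SOURCE A (Python) =====
-- def _match_full_or_suffix(times: list[str], full_ts_to_val: dict) -> list:
--     values = []
--     keys = list(full_ts_to_val.keys())
--     for t in times:
--         key = None
--         if len(t) == 5:  # HH:MM
--             # Search for a key that ends with ' HH:MM'
--             suffix = f" {t}"
--             for k in keys:
--                 if k.endswith(suffix):
--                     key = k
--                     break
--         else:
--             if t in full_ts_to_val:
--                 key = t
--         values.append(full_ts_to_val[key] if key is not None else None)
--     return values
-- ===== SOURCE B (Python) =====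
-- def _match_full_or_suffix(times: list[str], full_ts_to_val: dict) -> list:
--     # Precompute a map from each key's 6-char tail (" HH:MM") to its value,
--     # first key wins; then each time is answered by one O(1) lookup.
--     suffix_to_val = {}
--     for k, v in full_ts_to_val.items():
--         if len(k) >= 6:
--             s = k[-6:]
--             if s not in suffix_to_val:
--                 suffix_to_val[s] = v
--     return [suffix_to_val.get(" " + t) if len(t) == 5
--             else full_ts_to_val.get(t)
--             for t in times]
-- ===== Notes on version B (the rewrite author's own statement) =====
-- stated objective: faster
-- what changed: Instead of scanning every dict key per time with endswith, B builds a dict from each key's 6-char tail to the first such key's value in one pass over the items, then answers each time with a single dict lookup.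
import Mathlib
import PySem

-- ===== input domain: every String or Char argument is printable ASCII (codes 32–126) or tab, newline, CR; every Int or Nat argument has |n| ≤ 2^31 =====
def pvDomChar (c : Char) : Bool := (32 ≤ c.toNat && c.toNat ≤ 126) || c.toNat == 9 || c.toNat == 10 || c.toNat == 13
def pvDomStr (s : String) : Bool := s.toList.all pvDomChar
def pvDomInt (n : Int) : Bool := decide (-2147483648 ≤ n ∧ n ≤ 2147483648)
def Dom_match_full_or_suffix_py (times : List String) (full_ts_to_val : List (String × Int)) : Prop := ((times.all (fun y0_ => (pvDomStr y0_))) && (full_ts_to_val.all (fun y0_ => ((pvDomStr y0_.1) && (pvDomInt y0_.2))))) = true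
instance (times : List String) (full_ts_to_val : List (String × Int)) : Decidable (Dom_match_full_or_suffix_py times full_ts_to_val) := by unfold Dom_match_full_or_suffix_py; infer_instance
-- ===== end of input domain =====

-- B replaces A's per-time linear scan over all keys with a suffix→value dict built in
-- one pass over the items, so each time is answered by a single lookup (objective: faster).

-- ===== PORT A =====
def match_full_or_suffix_py (times : List String) (full_ts_to_val : List (String × Int)) : List (Option Int) :=
  let d := PySem.Dict.ofList full_ts_to_val
  let keys := d.keys
  times.foldl (fun values t =>
    let key : Option String :=
      if PySem.Str.len t = 5 then
        -- for k in keys: if k.endswith(" " + t): key = k; break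
        keys.foldl (fun key k =>
          match key with
          | some _ => key
          | none => if PySem.Str.endswith k (" " ++ t) then some k else none) none
      else
        if d.contains t then some t else none
    values ++ [match key with
               | some k => d.get? k   -- full_ts_to_val[key]; key ∈ keys, so this is some _
               | none => none]) []

-- ===== PORT B =====
def match_full_or_suffix_py_alt (times : List String) (full_ts_to_val : List (String × Int)) : List (Option Int) :=
  let d := PySem.Dict.ofList full_ts_to_val
  let sdict := d.items.foldl (fun sd p =>
    if 6 ≤ PySem.Str.len p.1 then
      let s := String.ofList (PySem.List.slice p.1.toList (some (-6)) none)  -- s = k[-6:]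
      if sd.contains s then sd else sd.insert s p.2
    else sd) PySem.Dict.empty
  times.map (fun t =>
    if PySem.Str.len t = 5 then sdict.get? (" " ++ t) else d.get? t)

-- ===== PRECONDITION & SPEC =====
def Spec_match_full_or_suffix_py (times : List String) (full_ts_to_val : List (String × Int)) (out : List (Option Int)) : Prop := out = match_full_or_suffix_py_alt times full_ts_to_val
instance (times : List String) (full_ts_to_val : List (String × Int)) (out : List (Option Int)) : Decidable (Spec_match_full_or_suffix_py times full_ts_to_val out) := by unfold Spec_match_full_or_suffix_py; infer_instance

-- ===== CLAIM (what is proved, stated in full; the proofs are below) =====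
def Claim_equal_match_full_or_suffix_py : Prop := ∀ (times : List String) (full_ts_to_val : List (String × Int)), Dom_match_full_or_suffix_py times full_ts_to_val → Spec_match_full_or_suffix_py times full_ts_to_val (match_full_or_suffix_py times full_ts_to_val)

-- ===== LEMMAS AND PROOFS =====

-- abbreviations used only by the proofs
def pvSuffix6 (k : String) : String := String.ofList (PySem.List.slice k.toList (some (-6)) none)

def pvStep (sd : PySem.Dict String Int) (p : String × Int) : PySem.Dict String Int :=
  if 6 ≤ PySem.Str.len p.1 then
    if sd.contains (pvSuffix6 p.1) then sd else sd.insert (pvSuffix6 p.1) p.2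
  else sd

theorem pvStep_of_short (sd : PySem.Dict String Int) (p : String × Int)
    (h : ¬ 6 ≤ PySem.Str.len p.1) : pvStep sd p = sd := by
  simp only [pvStep, if_neg h]

theorem pvStep_of_contains (sd : PySem.Dict String Int) (p : String × Int)
    (h6 : 6 ≤ PySem.Str.len p.1) (hc : sd.contains (pvSuffix6 p.1) = true) :
    pvStep sd p = sd := by
  simp only [pvStep, if_pos h6, if_pos hc]

theorem pvStep_of_new (sd : PySem.Dict String Int) (p : String × Int)
    (h6 : 6 ≤ PySem.Str.len p.1) (hc : ¬ sd.contains (pvSuffix6 p.1) = true) :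
    pvStep sd p = sd.insert (pvSuffix6 p.1) p.2 := by
  simp only [pvStep, if_pos h6, if_neg hc]

-- k.endswith(q) for a 6-char q is: len(k) ≥ 6 and k[-6:] = q
theorem pvEndswith_char (k q : String) (hq : q.toList.length = 6) :
    PySem.Str.endswith k q = true ↔ (6 ≤ PySem.Str.len k ∧ pvSuffix6 k = q) := by
  rw [PySem.Str.endswith_eq, PySem.Chars.endswith_iff, PySem.Str.len_eq]
  unfold pvSuffix6
  rw [PySem.List.slice_from_neg_ofNat k.toList 6 (by norm_num)]
  constructor
  · intro h
    have hl : 6 ≤ k.toList.length := hq ▸ h.length_le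
    refine ⟨by exact_mod_cast hl, ?_⟩
    have := List.suffix_iff_eq_drop.mp h
    rw [hq] at this
    rw [← this, String.ofList_toList]
  · rintro ⟨-, hs⟩
    have : k.toList.drop (k.toList.length - 6) = q.toList := by
      rw [← hs, String.toList_ofList]
    exact this ▸ List.drop_suffix _ _

-- once q is present, the suffix-dict loop never changes its value
theorem pvFold_preserve (items : List (String × Int)) (q : String) :
    ∀ sd : PySem.Dict String Int, sd.contains q = true →
      (items.foldl pvStep sd).get? q = sd.get? q := by
  induction items with
  | nil => intro sd _; rfl
  | cons p rest ih =>
    intro sd hc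
    rw [List.foldl_cons]
    by_cases h6 : 6 ≤ PySem.Str.len p.1
    · by_cases hcs : sd.contains (pvSuffix6 p.1) = true
      · rw [pvStep_of_contains sd p h6 hcs]; exact ih sd hc
      · have hne : q ≠ pvSuffix6 p.1 := by
          intro h; rw [h] at hc; exact hcs hc
        rw [pvStep_of_new sd p h6 hcs,
            ih _ (by simp [PySem.Dict.contains_insert, hc]),
            PySem.Dict.get?_insert_of_ne _ _ hne]
    · rw [pvStep_of_short sd p h6]; exact ih sd hc

-- the suffix dict answers q with the value of the FIRST key ending in q
theorem pvFold_find (items : List (String × Int)) (q : String) (hq : q.toList.length = 6) :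
    ∀ sd : PySem.Dict String Int, sd.contains q = false →
      (items.foldl pvStep sd).get? q
        = (items.find? (fun p => PySem.Str.endswith p.1 q)).map Prod.snd := by
  induction items with
  | nil =>
    intro sd hc
    simpa using (PySem.Dict.get?_eq_none_iff_contains sd q).mpr hc
  | cons p rest ih =>
    intro sd hc
    rw [List.foldl_cons]
    by_cases he : PySem.Str.endswith p.1 q = true
    · obtain ⟨hlen, hs⟩ := (pvEndswith_char p.1 q hq).mp he
      rw [pvStep_of_new sd p hlen (by rw [hs]; simp [hc]), hs,
          pvFold_preserve rest q _ (PySem.Dict.contains_insert_self sd q p.2),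
          PySem.Dict.get?_insert_self, List.find?_cons_of_pos (p := fun pr : String × Int => PySem.Str.endswith pr.1 q) he]
      rfl
    · have hstep : (pvStep sd p).contains q = false := by
        by_cases h6 : 6 ≤ PySem.Str.len p.1
        · by_cases hcs : sd.contains (pvSuffix6 p.1) = true
          · rw [pvStep_of_contains sd p h6 hcs]; exact hc
          · have hne : q ≠ pvSuffix6 p.1 := by
              intro h
              exact he ((pvEndswith_char p.1 q hq).mpr ⟨h6, h.symm⟩)
            rw [pvStep_of_new sd p h6 hcs]
            simp [PySem.Dict.contains_insert, hc, hne]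
        · rw [pvStep_of_short sd p h6]; exact hc
      rw [ih _ hstep, List.find?_cons_of_neg (p := fun pr : String × Int => PySem.Str.endswith pr.1 q) he]

-- A's 'for … break' fold is List.find?
theorem pvBreak_fold (l : List String) (p : String → Bool) :
    l.foldl (fun key k =>
      match key with
      | some _ => key
      | none => if p k then some k else none) none = l.find? p := by
  have hsome : ∀ (l' : List String) (a : String),
      l'.foldl (fun key k =>
        match key with
        | some _ => key
        | none => if p k then some k else none) (some a) = some a := by
    intro l'; induction l' with
    | nil => intro a; rfl
    | cons x xs ih => intro a; exact ih a
  induction l with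
  | nil => rfl
  | cons x xs ih =>
    show xs.foldl _ (if p x then some x else none) = _
    by_cases hp : p x = true
    · rw [if_pos hp, hsome, List.find?_cons_of_pos hp]
    · rw [if_neg hp, ih, List.find?_cons_of_neg hp]

-- looking up the found key in d is the found item's value
theorem pvKeys_find (d : PySem.Dict String Int) (hn : d.keys.Nodup) (q : String) :
    (match d.keys.find? (fun k => PySem.Str.endswith k q) with
     | some k => d.get? k
     | none => none)
      = (d.items.find? (fun p => PySem.Str.endswith p.1 q)).map Prod.snd := by
  have hk : d.keys = d.items.map Prod.fst := rfl
  have hcomp : (fun p : String × Int => PySem.Str.endswith p.1 q)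
      = ((fun k => PySem.Str.endswith k q) ∘ Prod.fst) := rfl
  rw [hk, List.find?_map, hcomp]
  cases hf : d.items.find? ((fun k => PySem.Str.endswith k q) ∘ Prod.fst) with
  | none => rfl
  | some pr =>
    simp only [Option.map_some]
    exact PySem.Dict.get?_of_mem_items d (k := pr.1) (v := pr.2)
      (List.mem_of_find?_eq_some hf) hn

-- ===== VERDICT (by name: the statement is the Claim_ definition above) =====
theorem match_full_or_suffix_py_spec : Claim_equal_match_full_or_suffix_py := by
  intro times l _
  unfold Spec_match_full_or_suffix_py match_full_or_suffix_py match_full_or_suffix_py_alt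
  simp only []
  rw [PySem.List.foldl_append_singleton_eq_map, List.nil_append]
  set d := PySem.Dict.ofList l with hd
  apply List.map_congr_left
  intro t _
  by_cases h5 : PySem.Str.len t = 5
  · rw [if_pos h5, if_pos h5]
    have hq : (" " ++ t).toList.length = 6 := by
      have : t.toList.length = 5 := by
        have := PySem.Str.len_eq t; omega
      simp [String.toList_append, this]
    rw [pvBreak_fold, pvKeys_find d (hd ▸ PySem.Dict.nodup_keys_ofList l) (" " ++ t),
        show (fun sd (p : String × Int) => if 6 ≤ PySem.Str.len p.1 then
            if sd.contains (String.ofList (PySem.List.slice p.1.toList (some (-6)) none)) then sd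
            else sd.insert (String.ofList (PySem.List.slice p.1.toList (some (-6)) none)) p.2
          else sd) = pvStep from rfl,
        pvFold_find d.items (" " ++ t) hq PySem.Dict.empty (PySem.Dict.contains_empty _)]
  · rw [if_neg h5, if_neg h5, PySem.Dict.contains_eq_isSome_get?]
    cases h : d.get? t <;> simp [h]
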